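-- pv_equiv track=rewrite | github.com/christophevg/yoker | src/yoker/tools/web_guardrail.py | _domain_matches_list
-- ===== SOURCE A (Python) =====
-- def _domain_matches_list(domain: str, patterns: tuple[str, ...]) -> bool:
--   """Check if domain matches any pattern in list.
--
--   Supports wildcard matching:
--     - "*.example.com" matches "api.example.com", "v1.api.example.com"
--     - "example.com" matches only "example.com"
--
--   Args:
--     domain: Domain to check (lowercase).
--     patterns: List of patterns (may include wildcards).
--
--   Returns:
--     True if domain matches any pattern.
--   """
--   domain_lower = domain.lower()
--
--   for pattern in patterns:
--     pattern_lower = pattern.lower()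
--
--     if pattern_lower.startswith("*."):
--       # Wildcard pattern - match any subdomain
--       suffix = pattern_lower[1:]  # Remove "*"
--       if domain_lower.endswith(suffix) or domain_lower == pattern_lower[2:]:
--         return True
--     else:
--       # Exact match
--       if domain_lower == pattern_lower:
--         return True
--
--   return False
-- ===== SOURCE B (Python) =====
-- def _domain_matches_list(domain: str, patterns: tuple[str, ...]) -> bool:
--   """Check if domain matches any pattern in list (set-index + dot-suffix scan)."""
--   exacts = set()
--   wild_suffixes = set()
--   for pattern in patterns:
--     p = pattern.lower()
--     if p.startswith("*."):
--       wild_suffixes.add(p[1:])   # ".example.com" — dot-anchored suffix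
--       exacts.add(p[2:])          # wildcard also matches its bare base
--     else:
--       exacts.add(p)
--
--   d = domain.lower()
--   if d in exacts:
--     return True
--   for i, ch in enumerate(d):
--     if ch == "." and d[i:] in wild_suffixes:
--       return True
--   return False
-- ===== Notes on version B (the rewrite author's own statement) =====
-- stated objective: alternative
-- what changed: Instead of re-scanning every pattern with startswith/endswith per query, B makes one pass over the patterns building a set of exact-match strings (non-wildcard patterns plus each wildcard's bare base) and a set of dot-anchored wildcard suffixes, then answers by one set lookup of the lowercased domain followed by a scan over the domain's own dot positions testing each dot-suffix for set membership.
import Mathlib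
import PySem

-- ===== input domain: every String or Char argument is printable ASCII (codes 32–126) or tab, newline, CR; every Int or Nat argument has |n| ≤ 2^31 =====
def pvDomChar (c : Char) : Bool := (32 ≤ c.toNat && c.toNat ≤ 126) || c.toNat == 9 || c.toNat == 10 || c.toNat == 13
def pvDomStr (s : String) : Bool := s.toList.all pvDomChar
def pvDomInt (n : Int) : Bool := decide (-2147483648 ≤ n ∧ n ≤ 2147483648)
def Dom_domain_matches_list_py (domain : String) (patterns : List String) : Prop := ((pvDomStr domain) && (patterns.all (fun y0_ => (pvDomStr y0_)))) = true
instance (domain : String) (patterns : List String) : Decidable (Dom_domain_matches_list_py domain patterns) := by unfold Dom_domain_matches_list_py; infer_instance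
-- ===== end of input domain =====

-- B replaces A's per-pattern endswith scan by two sets built in one pass (exact strings and
-- dot-anchored wildcard suffixes) plus a scan over the domain's own dot positions (objective: alternative).

-- ===== PORT A =====
-- the 'for pattern in patterns' loop with its early returns
def pvALoop (domain_lower : String) : List String → Bool
  | [] => false
  | pattern :: rest =>
    let pattern_lower := PySem.Str.lower pattern
    if PySem.Str.startswith pattern_lower "*." then
      -- wildcard pattern: suffix = pattern_lower[1:]
      if PySem.Str.endswith domain_lower (PySem.Str.slice pattern_lower (some 1) none)
          || domain_lower == PySem.Str.slice pattern_lower (some 2) none then true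
      else pvALoop domain_lower rest
    else
      if domain_lower == pattern_lower then true
      else pvALoop domain_lower rest

def domain_matches_list_py (domain : String) (patterns : List String) : Bool :=
  pvALoop (PySem.Str.lower domain) patterns

-- ===== PORT B =====
-- one pass over patterns building (exacts, wild_suffixes)
def pvBCollect : List String → PySem.Set String × PySem.Set String → PySem.Set String × PySem.Set String
  | [], acc => acc
  | pattern :: rest, acc =>
    let p := PySem.Str.lower pattern
    if PySem.Str.startswith p "*." then
      pvBCollect rest (PySem.Set.add acc.1 (PySem.Str.slice p (some 2) none),
                       PySem.Set.add acc.2 (PySem.Str.slice p (some 1) none))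
    else
      pvBCollect rest (PySem.Set.add acc.1 p, acc.2)

def domain_matches_list_py_alt (domain : String) (patterns : List String) : Bool :=
  let sets := pvBCollect patterns (PySem.Set.empty, PySem.Set.empty)
  let d := PySem.Str.lower domain
  if PySem.Set.contains sets.1 d then true
  else
    -- 'for i, ch in enumerate(d): if ch == "." and d[i:] in wild_suffixes: return True'
    (PySem.List.enumerate d.toList 0).any fun ic =>
      ic.2 == '.' && PySem.Set.contains sets.2 (PySem.Str.slice d (some ic.1) none)

-- ===== PRECONDITION & SPEC =====
def Spec_domain_matches_list_py (domain : String) (patterns : List String) (out : Bool) : Prop := out = domain_matches_list_py_alt domain patterns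
instance (domain : String) (patterns : List String) (out : Bool) : Decidable (Spec_domain_matches_list_py domain patterns out) := by unfold Spec_domain_matches_list_py; infer_instance

-- ===== CLAIM (what is proved, stated in full; the proofs are below) =====
def Claim_equal_domain_matches_list_py : Prop := ∀ (domain : String) (patterns : List String), Dom_domain_matches_list_py domain patterns → Spec_domain_matches_list_py domain patterns (domain_matches_list_py domain patterns)

-- ===== LEMMAS AND PROOFS =====

-- the per-pattern predicate A tests
def pvMatch (d p : String) : Bool :=
  let pl := PySem.Str.lower p
  if PySem.Str.startswith pl "*." then
    PySem.Str.endswith d (PySem.Str.slice pl (some 1) none) || d == PySem.Str.slice pl (some 2) none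
  else d == pl

-- the exact-set entry B stores for pattern p
def pvExactOf (p : String) : String :=
  let pl := PySem.Str.lower p
  if PySem.Str.startswith pl "*." then PySem.Str.slice pl (some 2) none else pl

lemma pvALoop_any (d : String) (ps : List String) : pvALoop d ps = ps.any (pvMatch d) := by
  induction ps with
  | nil => rfl
  | cons p rest ih =>
    by_cases h1 : PySem.Str.startswith (PySem.Str.lower p) "*." = true
    · by_cases h2 : (PySem.Str.endswith d (PySem.Str.slice (PySem.Str.lower p) (some 1) none)
          || d == PySem.Str.slice (PySem.Str.lower p) (some 2) none) = true
      · simp only [pvALoop, pvMatch, List.any_cons, if_pos h1, h2, Bool.true_or]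
        simp
      · have h2' := eq_false_of_ne_true h2
        simp only [pvALoop, pvMatch, List.any_cons, if_pos h1, h2', Bool.false_or, ih]
        simp
    · by_cases h3 : (d == PySem.Str.lower p) = true
      · simp only [pvALoop, pvMatch, List.any_cons, if_neg h1, h3, Bool.true_or]
        simp
      · have h3' := eq_false_of_ne_true h3
        simp only [pvALoop, pvMatch, List.any_cons, if_neg h1, h3', Bool.false_or, ih]
        simp

lemma pvExactOf_wild (p : String) (h : PySem.Str.startswith (PySem.Str.lower p) "*." = true) :
    pvExactOf p = PySem.Str.slice (PySem.Str.lower p) (some 2) none := by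
  simp only [pvExactOf, if_pos h]

lemma pvExactOf_plain (p : String) (h : ¬ PySem.Str.startswith (PySem.Str.lower p) "*." = true) :
    pvExactOf p = PySem.Str.lower p := by
  simp only [pvExactOf, if_neg h]

lemma pvBCollect_cons_wild (p : String) (rest : List String)
    (acc : PySem.Set String × PySem.Set String)
    (h : PySem.Str.startswith (PySem.Str.lower p) "*." = true) :
    pvBCollect (p :: rest) acc =
      pvBCollect rest (PySem.Set.add acc.1 (PySem.Str.slice (PySem.Str.lower p) (some 2) none),
                       PySem.Set.add acc.2 (PySem.Str.slice (PySem.Str.lower p) (some 1) none)) := by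
  simp only [pvBCollect, if_pos h]

lemma pvBCollect_cons_plain (p : String) (rest : List String)
    (acc : PySem.Set String × PySem.Set String)
    (h : ¬ PySem.Str.startswith (PySem.Str.lower p) "*." = true) :
    pvBCollect (p :: rest) acc = pvBCollect rest (PySem.Set.add acc.1 (PySem.Str.lower p), acc.2) := by
  simp only [pvBCollect, if_neg h]

lemma pvBCollect_mem1 (ps : List String) (acc : PySem.Set String × PySem.Set String) (x : String) :
    x ∈ (pvBCollect ps acc).1 ↔ x ∈ acc.1 ∨ ∃ p ∈ ps, x = pvExactOf p := by
  induction ps generalizing acc with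
  | nil => simp [pvBCollect]
  | cons p rest ih =>
    by_cases h : PySem.Str.startswith (PySem.Str.lower p) "*." = true
    · rw [pvBCollect_cons_wild p rest acc h, ih]
      simp only [PySem.Set.mem_add, List.mem_cons]
      constructor
      · rintro ((hx | hx) | ⟨q, hq, hxq⟩)
        · exact Or.inl hx
        · exact Or.inr ⟨p, Or.inl rfl, by rw [hx, pvExactOf_wild p h]⟩
        · exact Or.inr ⟨q, Or.inr hq, hxq⟩
      · rintro (hx | ⟨q, (rfl | hq), hxq⟩)
        · exact Or.inl (Or.inl hx)
        · exact Or.inl (Or.inr (by rw [hxq, pvExactOf_wild q h]))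
        · exact Or.inr ⟨q, hq, hxq⟩
    · rw [pvBCollect_cons_plain p rest acc h, ih]
      simp only [PySem.Set.mem_add, List.mem_cons]
      constructor
      · rintro ((hx | hx) | ⟨q, hq, hxq⟩)
        · exact Or.inl hx
        · exact Or.inr ⟨p, Or.inl rfl, by rw [hx, pvExactOf_plain p h]⟩
        · exact Or.inr ⟨q, Or.inr hq, hxq⟩
      · rintro (hx | ⟨q, (rfl | hq), hxq⟩)
        · exact Or.inl (Or.inl hx)
        · exact Or.inl (Or.inr (by rw [hxq, pvExactOf_plain q h]))
        · exact Or.inr ⟨q, hq, hxq⟩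

lemma pvBCollect_mem2 (ps : List String) (acc : PySem.Set String × PySem.Set String) (x : String) :
    x ∈ (pvBCollect ps acc).2 ↔ x ∈ acc.2 ∨ ∃ p ∈ ps,
      PySem.Str.startswith (PySem.Str.lower p) "*." = true ∧
      x = PySem.Str.slice (PySem.Str.lower p) (some 1) none := by
  induction ps generalizing acc with
  | nil => simp [pvBCollect]
  | cons p rest ih =>
    by_cases h : PySem.Str.startswith (PySem.Str.lower p) "*." = true
    · rw [pvBCollect_cons_wild p rest acc h, ih]
      simp only [PySem.Set.mem_add, List.mem_cons]
      constructor
      · rintro ((hx | hx) | ⟨q, hq, hxq⟩)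
        · exact Or.inl hx
        · exact Or.inr ⟨p, Or.inl rfl, h, hx⟩
        · exact Or.inr ⟨q, Or.inr hq, hxq⟩
      · rintro (hx | ⟨q, (rfl | hq), hq2, hxq⟩)
        · exact Or.inl (Or.inl hx)
        · exact Or.inl (Or.inr hxq)
        · exact Or.inr ⟨q, hq, hq2, hxq⟩
    · rw [pvBCollect_cons_plain p rest acc h, ih]
      simp only [List.mem_cons]
      constructor
      · rintro (hx | ⟨q, hq, hxq⟩)
        · exact Or.inl hx
        · exact Or.inr ⟨q, Or.inr hq, hxq⟩
      · rintro (hx | ⟨q, (rfl | hq), hq2, hxq⟩)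
        · exact Or.inl hx
        · exact absurd hq2 h
        · exact Or.inr ⟨q, hq, hq2, hxq⟩

lemma pvWildShape (p : String) (h : PySem.Str.startswith p "*." = true) :
    ∃ t, p.toList = '*' :: '.' :: t := by
  rw [PySem.Str.startswith_eq, PySem.Chars.startswith_iff] at h
  obtain ⟨t, ht⟩ := h
  exact ⟨t, by simpa using ht.symm⟩

lemma pvDotSuffix_iff (dl t : List Char) :
    ('.' :: t) <:+ dl ↔ ∃ i, ∃ _ : i < dl.length, dl[i] = '.' ∧ dl.drop i = '.' :: t := by
  constructor
  · rintro ⟨pre, hpre⟩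
    subst hpre
    refine ⟨pre.length, by simp, ?_, ?_⟩
    · simp
    · rw [List.drop_left]
  · rintro ⟨i, h, _, hd⟩
    exact hd ▸ List.drop_suffix i dl

lemma pvContains_iff (s : PySem.Set String) (x : String) :
    PySem.Set.contains s x = true ↔ x ∈ s := by
  simp [PySem.Set.contains]

lemma pvSliceDrop (s : String) (k : Nat) :
    (PySem.Str.slice s (some (k : Int)) none).toList = s.toList.drop k := by
  rw [PySem.Str.toList_slice, PySem.Chars.slice_eq_listSlice, PySem.List.slice_from_natCast]

lemma pvEndswith_iff (d s : String) :
    PySem.Str.endswith d s = true ↔ s.toList <:+ d.toList := by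
  rw [PySem.Str.endswith_eq, PySem.Chars.endswith_iff]

lemma pvAlt_eq (domain : String) (patterns : List String) :
    domain_matches_list_py_alt domain patterns =
      (if PySem.Set.contains (pvBCollect patterns (PySem.Set.empty, PySem.Set.empty)).1
            (PySem.Str.lower domain) then true
       else (PySem.List.enumerate (PySem.Str.lower domain).toList 0).any fun ic =>
         ic.2 == '.' && PySem.Set.contains (pvBCollect patterns (PySem.Set.empty, PySem.Set.empty)).2
           (PySem.Str.slice (PySem.Str.lower domain) (some ic.1) none)) := rfl

theorem pv_main (domain : String) (patterns : List String) :
    domain_matches_list_py domain patterns = domain_matches_list_py_alt domain patterns := by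
  unfold domain_matches_list_py
  rw [pvAlt_eq, pvALoop_any]
  set d := PySem.Str.lower domain with hd
  set E := pvBCollect patterns (PySem.Set.empty, PySem.Set.empty) with hE
  have memE1 : ∀ x, x ∈ E.1 ↔ ∃ p ∈ patterns, x = pvExactOf p := by
    intro x; rw [hE, pvBCollect_mem1]; simp [PySem.Set.empty]
  have memE2 : ∀ x, x ∈ E.2 ↔ ∃ p ∈ patterns,
      PySem.Str.startswith (PySem.Str.lower p) "*." = true ∧
      x = PySem.Str.slice (PySem.Str.lower p) (some 1) none := by
    intro x; rw [hE, pvBCollect_mem2]; simp [PySem.Set.empty]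
  by_cases hc : PySem.Set.contains E.1 d = true
  · rw [if_pos hc]
    rw [pvContains_iff, memE1] at hc
    obtain ⟨p, hp, hdp⟩ := hc
    rw [List.any_eq_true]
    refine ⟨p, hp, ?_⟩
    by_cases h : PySem.Str.startswith (PySem.Str.lower p) "*." = true
    · have : d = PySem.Str.slice (PySem.Str.lower p) (some 2) none := by
        rw [hdp, pvExactOf_wild p h]
      simp only [pvMatch, if_pos h, this, beq_self_eq_true, Bool.or_true]
    · have : d = PySem.Str.lower p := by rw [hdp, pvExactOf_plain p h]
      simp only [pvMatch, if_neg h, this, beq_self_eq_true]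
  · rw [if_neg hc, Bool.eq_iff_iff, List.any_eq_true, List.any_eq_true]
    constructor
    · rintro ⟨p, hp, hm⟩
      by_cases h : PySem.Str.startswith (PySem.Str.lower p) "*." = true
      · simp only [pvMatch, if_pos h, Bool.or_eq_true, beq_iff_eq] at hm
        rcases hm with hm | hm
        · obtain ⟨t, hshape⟩ := pvWildShape (PySem.Str.lower p) h
          have hsuf1 : (PySem.Str.slice (PySem.Str.lower p) (some 1) none).toList = '.' :: t := by
            rw [show ((1 : Int) = ((1 : Nat) : Int)) from rfl, pvSliceDrop, hshape]; rfl
          rw [pvEndswith_iff, hsuf1] at hm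
          rw [pvDotSuffix_iff] at hm
          obtain ⟨i, hi, hdot, hdrop⟩ := hm
          refine ⟨((i : Int), d.toList[i]), ?_, ?_⟩
          · rw [PySem.List.mem_enumerate_iff]
            exact ⟨i, hi, by simp⟩
          · simp only [hdot, beq_self_eq_true, Bool.true_and]
            rw [pvContains_iff, memE2]
            refine ⟨p, hp, h, ?_⟩
            apply String.toList_inj.mp
            rw [pvSliceDrop, hdrop, hsuf1]
        · exfalso; apply hc
          rw [pvContains_iff, memE1]
          exact ⟨p, hp, by rw [hm, pvExactOf_wild p h]⟩
      · simp only [pvMatch, if_neg h, beq_iff_eq] at hm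
        exfalso; apply hc
        rw [pvContains_iff, memE1]
        exact ⟨p, hp, by rw [hm, pvExactOf_plain p h]⟩
    · rintro ⟨ic, hic, hpred⟩
      rw [PySem.List.mem_enumerate_iff] at hic
      obtain ⟨k, hk, rfl⟩ := hic
      simp only [Bool.and_eq_true] at hpred
      obtain ⟨-, hin⟩ := hpred
      rw [pvContains_iff, memE2] at hin
      obtain ⟨p, hp, h, hsl⟩ := hin
      refine ⟨p, hp, ?_⟩
      simp only [pvMatch, if_pos h, Bool.or_eq_true]
      left
      rw [pvEndswith_iff, ← hsl]
      have : (PySem.Str.slice d (some ((0 : Int) + (k : Int))) none).toList = d.toList.drop k := by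
        rw [zero_add, pvSliceDrop]
      rw [this]
      exact List.drop_suffix k d.toList

-- ===== VERDICT (by name: the statement is the Claim_ definition above) =====
theorem domain_matches_list_py_spec : Claim_equal_domain_matches_list_py := by
  intro domain patterns _
  exact pv_main domain patterns
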